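-- pv_equiv track=rewrite | github.com/Renatoassis86/dieese_rn | estudo_informalidade_2025/scripts/02_informalidade_por_sexo.py | _jitter_seq
-- ===== SOURCE A (Python) =====
-- from typing import List, Tuple, Dict
--
-- def _jitter_seq(n: int, base_px: int = 6) -> List[int]:
--     seq = [0]
--     k = 1
--     while len(seq) < n:
--         seq.append(base_px*k)
--         if len(seq) < n: seq.append(-base_px*k)
--         k += 1
--     return seq[:n]
-- ===== SOURCE B (Python) =====
-- from typing import List
--
-- def _jitter_seq(n: int, base_px: int = 6) -> List[int]:
--     # closed-form: element i is base_px*((i+1)//2), sign alternating (+ on odd i)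
--     return [base_px * ((i + 1) // 2) * (1 if i % 2 == 1 else -1) for i in range(n)]
-- ===== Notes on version B (the rewrite author's own statement) =====
-- stated objective: simpler
-- what changed: Replaces the while-loop that appends two elements per step and truncates with a slice by a single closed-form formula over each index of range(n).
import Mathlib
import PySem

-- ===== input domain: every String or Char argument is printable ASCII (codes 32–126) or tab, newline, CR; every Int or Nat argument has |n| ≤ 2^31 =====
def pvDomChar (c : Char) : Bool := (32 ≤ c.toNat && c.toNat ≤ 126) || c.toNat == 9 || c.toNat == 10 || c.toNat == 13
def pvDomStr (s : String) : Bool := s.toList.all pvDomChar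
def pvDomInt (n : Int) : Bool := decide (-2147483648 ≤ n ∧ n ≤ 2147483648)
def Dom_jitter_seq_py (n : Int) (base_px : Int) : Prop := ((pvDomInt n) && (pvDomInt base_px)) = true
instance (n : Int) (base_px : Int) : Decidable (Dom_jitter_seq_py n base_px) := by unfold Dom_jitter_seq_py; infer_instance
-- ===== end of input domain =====

-- B replaces A's while-loop (two appends per step, then a truncating slice) by a closed-form
-- formula per index over range(n); objective: simpler.

-- ===== PORT A =====
-- the while loop: seq grows until len(seq) >= n; k counts iterations
def jitterLoopA (n base : Int) (seq : List Int) (k : Int) : List Int :=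
  if h : (seq.length : Int) < n then
    let s1 := seq ++ [base * k]
    let s2 := if (s1.length : Int) < n then s1 ++ [-base * k] else s1
    jitterLoopA n base s2 (k + 1)
  else seq
termination_by (n - seq.length).toNat
decreasing_by
  simp only [List.length_append, List.length_singleton]
  split <;> simp <;> omega

def jitter_seq_py (n : Int) (base_px : Int) : List Int :=
  PySem.List.slice (jitterLoopA n base_px [0] 1) none (some n)

-- ===== PORT B =====
def jitter_seq_py_alt (n : Int) (base_px : Int) : List Int :=
  (PySem.List.pyRange 0 n 1).map
    (fun i => base_px * PySem.Int.floordiv (i + 1) 2 *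
      (if PySem.Int.mod i 2 == 1 then 1 else -1))

-- ===== PRECONDITION & SPEC =====
def Spec_jitter_seq_py (n : Int) (base_px : Int) (out : List Int) : Prop := out = jitter_seq_py_alt n base_px
instance (n : Int) (base_px : Int) (out : List Int) : Decidable (Spec_jitter_seq_py n base_px out) := by unfold Spec_jitter_seq_py; infer_instance

-- ===== CLAIM (what is proved, stated in full; the proofs are below) =====
def Claim_equal_jitter_seq_py : Prop := ∀ (n : Int) (base_px : Int), Dom_jitter_seq_py n base_px → Spec_jitter_seq_py n base_px (jitter_seq_py n base_px)

-- ===== LEMMAS AND PROOFS =====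

-- the closed-form element at (Nat) index i
def pvElem (base : Int) (i : Nat) : Int :=
  base * PySem.Int.floordiv ((i : Int) + 1) 2 *
    (if PySem.Int.mod (i : Int) 2 == 1 then 1 else -1)

def pvPatt (base : Int) (m : Nat) : List Int := (List.range m).map (pvElem base)

lemma pvPatt_length (base : Int) (m : Nat) : (pvPatt base m).length = m := by
  simp [pvPatt]

lemma pvPatt_succ (base : Int) (m : Nat) :
    pvPatt base (m + 1) = pvPatt base m ++ [pvElem base m] := by
  simp [pvPatt, List.range_succ]

lemma pvElem_odd (base : Int) (m : Nat) :
    pvElem base (2 * m + 1) = base * ((m : Int) + 1) := by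
  unfold pvElem
  have h1 : ((2 * m + 1 : Nat) : Int) + 1 = ((2 * m + 2 : Nat) : Int) := by push_cast; ring
  rw [h1]
  have hf : PySem.Int.floordiv ((2 * m + 2 : Nat) : Int) 2 = (m : Int) + 1 := by
    rw [PySem.Int.floordiv_eq_ediv_of_pos (by norm_num)]; push_cast; omega
  have hm : PySem.Int.mod ((2 * m + 1 : Nat) : Int) 2 = 1 := by
    rw [PySem.Int.mod_eq_emod_of_pos (by norm_num)]; push_cast; omega
  rw [hf, hm]
  simp

lemma pvElem_even (base : Int) (m : Nat) :
    pvElem base (2 * m + 2) = -(base * ((m : Int) + 1)) := by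
  unfold pvElem
  have h1 : ((2 * m + 2 : Nat) : Int) + 1 = ((2 * m + 3 : Nat) : Int) := by push_cast; ring
  rw [h1]
  have hf : PySem.Int.floordiv ((2 * m + 3 : Nat) : Int) 2 = (m : Int) + 1 := by
    rw [PySem.Int.floordiv_eq_ediv_of_pos (by norm_num)]; push_cast; omega
  have hm : PySem.Int.mod ((2 * m + 2 : Nat) : Int) 2 = 0 := by
    rw [PySem.Int.mod_eq_emod_of_pos (by norm_num)]; push_cast; omega
  rw [hf, hm]
  norm_num

-- loop invariant: entering the loop with seq = pattern of odd length 2m+1 and k = m+1,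
-- the loop returns a pattern of some length ≥ n
lemma jitterLoopA_patt (n base : Int) :
    ∀ m : Nat, ∃ L : Nat, jitterLoopA n base (pvPatt base (2 * m + 1)) ((m : Int) + 1)
      = pvPatt base L ∧ n ≤ (L : Int) := by
  have key : ∀ (fuel m : Nat), (n - (2 * m + 1)).toNat ≤ fuel →
      ∃ L : Nat, jitterLoopA n base (pvPatt base (2 * m + 1)) ((m : Int) + 1)
        = pvPatt base L ∧ n ≤ (L : Int) := by
    intro fuel
    induction fuel with
    | zero =>
      intro m hm
      refine ⟨2 * m + 1, ?_, by omega⟩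
      rw [jitterLoopA]
      rw [dif_neg (by simp [pvPatt_length]; omega)]
    | succ fuel ih =>
      intro m hm
      by_cases h : ((2 * m + 1 : Nat) : Int) < n
      · rw [jitterLoopA, dif_pos (by simpa [pvPatt_length] using h)]
        have hs1 : pvPatt base (2 * m + 1) ++ [base * ((m : Int) + 1)]
            = pvPatt base (2 * m + 2) := by
          conv_rhs => rw [show (2:Nat) * m + 2 = (2 * m + 1) + 1 from rfl, pvPatt_succ]
          rw [pvElem_odd]
        by_cases h2 : ((2 * m + 2 : Nat) : Int) < n
        · have hs2 : pvPatt base (2 * m + 2) ++ [-base * ((m : Int) + 1)]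
              = pvPatt base (2 * m + 3) := by
            conv_rhs => rw [show (2:Nat) * m + 3 = (2 * m + 2) + 1 from rfl, pvPatt_succ]
            rw [pvElem_even, neg_mul]
          simp only [hs1]
          rw [if_pos (by simpa [pvPatt_length] using h2), hs2]
          have := ih (m + 1) (by omega)
          have hcast : ((m : Int) + 1) + 1 = ((m + 1 : Nat) : Int) + 1 := by push_cast; ring
          have hidx : 2 * m + 3 = 2 * (m + 1) + 1 := by omega
          rw [hcast, hidx]
          exact this
        · simp only [hs1]
          rw [if_neg (by simpa [pvPatt_length] using h2)]
          refine ⟨2 * m + 2, ?_, by omega⟩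
          rw [jitterLoopA, dif_neg (by simp [pvPatt_length]; omega)]
      · refine ⟨2 * m + 1, ?_, by omega⟩
        rw [jitterLoopA, dif_neg (by simp [pvPatt_length]; omega)]
  intro m
  exact key (n - (2 * m + 1)).toNat m le_rfl

lemma jitter_alt_eq_patt (n base : Int) :
    jitter_seq_py_alt n base = pvPatt base n.toNat := by
  unfold jitter_seq_py_alt pvPatt pvElem
  rw [PySem.List.pyRange_one 0 n]
  simp [List.map_map, Function.comp_def]

lemma pvPatt_take (base : Int) {a L : Nat} (h : a ≤ L) :
    (pvPatt base L).take a = pvPatt base a := by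
  unfold pvPatt
  rw [← List.map_take, List.take_range, Nat.min_eq_left h]

lemma pvPatt_one (base : Int) : pvPatt base 1 = [0] := by
  have h0 : pvElem base 0 = 0 := by
    unfold pvElem
    rw [show ((0:Nat):Int) + 1 = 1 from rfl,
      PySem.Int.floordiv_eq_ediv_of_pos (a := 1) (by norm_num)]
    norm_num
  simp [pvPatt, List.range_succ, h0]

-- ===== VERDICT (by name: the statement is the Claim_ definition above) =====
theorem jitter_seq_py_spec : Claim_equal_jitter_seq_py := by
  intro n base _
  unfold Spec_jitter_seq_py jitter_seq_py
  by_cases hn : 0 < n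
  · obtain ⟨L, hL, hnL⟩ := jitterLoopA_patt n base 0
    have h01 : ([0] : List Int) = pvPatt base (2 * 0 + 1) := by
      simpa using (pvPatt_one base).symm
    have h1 : (1 : Int) = ((0 : Nat) : Int) + 1 := by norm_num
    rw [h01, h1, hL, PySem.List.slice_to _ (le_of_lt hn),
      pvPatt_take base (by omega), jitter_alt_eq_patt]
  · rw [Int.not_lt] at hn
    have hloop : jitterLoopA n base [0] 1 = [0] := by
      rw [jitterLoopA, dif_neg (by simp; omega)]
    rw [hloop]
    have halt : jitter_seq_py_alt n base = [] := by
      unfold jitter_seq_py_alt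
      rw [PySem.List.pyRange_one_eq_nil (by omega)]
      rfl
    rw [halt]
    rcases eq_or_lt_of_le hn with h0 | hneg
    · subst h0; rw [PySem.List.slice_to _ le_rfl]; rfl
    · have hk : n = -(((-n).toNat : Nat) : Int) := by omega
      rw [hk, PySem.List.slice_to_neg_natCast _ _ (by omega)]
      simp
      omega
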